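-- pv_equiv track=rewrite | github.com/JiyooonPark/Algorithm | arrays/Question8.py | maxMult
-- ===== SOURCE A (Python) =====
-- def maxMult(A):
--     B = list()
--     BB = list()
--     R = list()
--     for i in range(len(A)):
--         for j in range(i+1, len(A)):
--             B.append(A[i] * A[j])
--             BB.append((A[i],A[j]))
--     for i in range(len(B)):
--         if B[i] == max(B):
--             R.append(BB[i])
--     return R
-- ===== SOURCE B (Python) =====
-- def maxMult(A):
--     n = len(A)
--     best = None
--     for i in range(n):
--         for j in range(i + 1, n):
--             p = A[i] * A[j]
--             if best is None or p > best:
--                 best = p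
--     if best is None:
--         return []
--     res = []
--     for i in range(n):
--         for j in range(i + 1, n):
--             if A[i] * A[j] == best:
--                 res.append((A[i], A[j]))
--     return res
-- ===== Notes on version B (the rewrite author's own statement) =====
-- stated objective: faster
-- what changed: B never materializes the parallel product/pair tables; it computes the maximum product in one pair scan with a None sentinel and then rescans the pairs to collect matches, while A builds B/BB lists and recomputes max(B) inside the filtering loop.
import Mathlib
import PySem

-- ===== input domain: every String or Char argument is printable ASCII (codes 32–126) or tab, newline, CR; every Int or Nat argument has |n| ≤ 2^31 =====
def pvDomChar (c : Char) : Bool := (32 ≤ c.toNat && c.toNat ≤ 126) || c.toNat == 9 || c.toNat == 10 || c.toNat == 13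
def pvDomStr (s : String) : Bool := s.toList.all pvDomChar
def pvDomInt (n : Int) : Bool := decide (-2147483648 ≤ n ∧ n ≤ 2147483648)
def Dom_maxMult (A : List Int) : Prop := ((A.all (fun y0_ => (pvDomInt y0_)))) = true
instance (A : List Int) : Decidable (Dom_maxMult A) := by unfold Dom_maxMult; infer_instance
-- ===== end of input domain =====

-- B avoids A's parallel product/pair tables and its repeated max(B) scan:
-- one pair scan with an Option sentinel finds the maximum product, a second
-- pair scan collects the matching (A[i], A[j]) pairs.

-- ===== PORT A =====
def maxMult (A : List Int) : List (Int × Int) :=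
  -- first nested loop: B.append(A[i]*A[j]); BB.append((A[i],A[j]))
  let st :=
    (PySem.List.pyRange 0 (A.length : Int) 1).foldl (fun (st : List Int × List (Int × Int)) i =>
      (PySem.List.pyRange (i + 1) (A.length : Int) 1).foldl (fun st j =>
        (st.1 ++ [PySem.List.pyGetD A i 0 * PySem.List.pyGetD A j 0],
         st.2 ++ [(PySem.List.pyGetD A i 0, PySem.List.pyGetD A j 0)])) st)
      (([] : List Int), ([] : List (Int × Int)))
  let B := st.1
  let BB := st.2
  -- second loop: if B[i] == max(B): R.append(BB[i])  (max(B) is only evaluated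
  -- when the loop body runs, i.e. B ≠ []; the .getD 0 default is never used)
  (PySem.List.pyRange 0 (B.length : Int) 1).foldl (fun R i =>
    if PySem.List.pyGetD B i 0 = (PySem.List.max? B (fun y => y)).getD 0 then
      R ++ [PySem.List.pyGetD BB i (0, 0)]
    else R) []

-- ===== PORT B =====
def maxMult_alt (A : List Int) : List (Int × Int) :=
  match (PySem.List.pyRange 0 (A.length : Int) 1).foldl (fun (best : Option Int) i =>
      (PySem.List.pyRange (i + 1) (A.length : Int) 1).foldl (fun best j =>
        let p := PySem.List.pyGetD A i 0 * PySem.List.pyGetD A j 0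
        match best with
        | none => some p
        | some b => if p > b then some p else some b) best) none with
  | none => []
  | some m =>
    (PySem.List.pyRange 0 (A.length : Int) 1).foldl (fun R i =>
      (PySem.List.pyRange (i + 1) (A.length : Int) 1).foldl (fun R j =>
        if PySem.List.pyGetD A i 0 * PySem.List.pyGetD A j 0 = m then
          R ++ [(PySem.List.pyGetD A i 0, PySem.List.pyGetD A j 0)]
        else R) R) []

-- ===== PRECONDITION & SPEC =====
def Spec_maxMult (A : List Int) (out : List (Int × Int)) : Prop := out = maxMult_alt A
instance (A : List Int) (out : List (Int × Int)) : Decidable (Spec_maxMult A out) := by unfold Spec_maxMult; infer_instance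

-- ===== CLAIM (what is proved, stated in full; the proofs are below) =====
def Claim_equal_maxMult : Prop := ∀ (A : List Int), Dom_maxMult A → Spec_maxMult A (maxMult A)

-- ===== LEMMAS AND PROOFS =====

-- index pairs (i, j) with 0 ≤ i < j < n, in the order both programs visit them
def pvIJ (n : Int) : List (Int × Int) :=
  (PySem.List.pyRange 0 n 1).flatMap (fun i =>
    (PySem.List.pyRange (i + 1) n 1).map (fun j => (i, j)))

-- a nested i/j loop is a single fold over the pair list pvIJ n
theorem pv_double_fold {β : Type} (n : Int) (g : β → Int → Int → β) (init : β) :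
    (PySem.List.pyRange 0 n 1).foldl (fun st i =>
        (PySem.List.pyRange (i + 1) n 1).foldl (fun st j => g st i j) st) init
    = (pvIJ n).foldl (fun st p => g st p.1 p.2) init := by
  unfold pvIJ
  generalize PySem.List.pyRange 0 n 1 = L
  induction L generalizing init with
  | nil => simp
  | cons i L ih =>
    simp only [List.flatMap_cons, List.foldl_append, List.foldl_cons, List.foldl_map]
    exact ih _

-- the running-max fold with a None sentinel over any list
theorem pv_optmax {α : Type} (f : α → Int) (t : List α) (b : Int) :
    t.foldl (fun (best : Option Int) p =>
        match best with
        | none => some (f p)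
        | some b => if f p > b then some (f p) else some b) (some b)
    = some ((t.map f).foldl max b) := by
  induction t generalizing b with
  | nil => simp
  | cons x t ih =>
    simp only [List.foldl_cons, List.map_cons]
    by_cases h : f x > b
    · rw [if_pos h, ih, max_eq_right h.le]
    · rw [if_neg h, ih, max_eq_left (by omega : f x ≤ b)]

-- A's second loop: index scan over B with BB in parallel = filter on the zip
theorem pv_idxloop (m : Int) (X : List Int) (Y : List (Int × Int)) (R0 : List (Int × Int))
    (hlen : X.length = Y.length) :
    (List.range X.length).foldl (fun R k =>
        if X.getD k 0 = m then R ++ [Y.getD k (0, 0)] else R) R0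
    = R0 ++ ((X.zip Y).filter (fun q => q.1 = m)).map Prod.snd := by
  induction X generalizing Y R0 with
  | nil => simp
  | cons x X ih =>
    cases Y with
    | nil => simp at hlen
    | cons y Y =>
      simp only [List.length_cons, List.range_succ_eq_map, List.foldl_cons, List.foldl_map,
        List.getD_cons_zero, List.getD_cons_succ, List.zip_cons_cons, List.filter_cons]
      rw [ih Y _ (by simpa using hlen)]
      by_cases h : x = m <;> simp [h]

-- the paired append fold builds (map f, map h)
theorem pv_build {α : Type} (f : α → Int) (h : α → Int × Int) (l : List α) :
    l.foldl (fun (st : List Int × List (Int × Int)) p =>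
        (st.1 ++ [f p], st.2 ++ [h p])) ([], [])
    = (l.map f, l.map h) := by
  rw [PySem.List.foldl_prod_mk (fun s e => s ++ [f e]) (fun s e => s ++ [h e]),
    PySem.List.foldl_append_singleton_eq_map, PySem.List.foldl_append_singleton_eq_map]
  simp

-- a fold appending on a condition is a filter-then-map
theorem pv_filtloop {α : Type} (c : α → Prop) [DecidablePred c] (g : α → Int × Int)
    (l : List α) (R0 : List (Int × Int)) :
    l.foldl (fun R q => if c q then R ++ [g q] else R) R0
    = R0 ++ (l.filter (fun q => c q)).map g := by
  induction l generalizing R0 with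
  | nil => simp
  | cons x l ih =>
    simp only [List.foldl_cons, List.filter_cons]
    by_cases h : c x <;> simp [h, ih]

-- the product / pair views of an index pair
def pvF (A : List Int) (p : Int × Int) : Int :=
  PySem.List.pyGetD A p.1 0 * PySem.List.pyGetD A p.2 0
def pvH (A : List Int) (p : Int × Int) : Int × Int :=
  (PySem.List.pyGetD A p.1 0, PySem.List.pyGetD A p.2 0)

-- common normal form of both programs
def pvRes (A : List Int) : List (Int × Int) :=
  match pvIJ (A.length : Int) with
  | [] => []
  | p :: t =>
    ((p :: t).filter (fun q => pvF A q = (t.map (pvF A)).foldl max (pvF A p))).map (pvH A)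

theorem pvA_char (A : List Int) : maxMult A = pvRes A := by
  unfold maxMult
  rw [pv_double_fold (A.length : Int)
      (fun (st : List Int × List (Int × Int)) i j =>
        (st.1 ++ [PySem.List.pyGetD A i 0 * PySem.List.pyGetD A j 0],
         st.2 ++ [(PySem.List.pyGetD A i 0, PySem.List.pyGetD A j 0)]))]
  rw [show (fun (st : List Int × List (Int × Int)) (p : Int × Int) =>
        (st.1 ++ [PySem.List.pyGetD A p.1 0 * PySem.List.pyGetD A p.2 0],
         st.2 ++ [(PySem.List.pyGetD A p.1 0, PySem.List.pyGetD A p.2 0)]))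
      = (fun st p => (st.1 ++ [pvF A p], st.2 ++ [pvH A p])) from rfl]
  rw [pv_build (pvF A) (pvH A)]
  cases hP : pvIJ (A.length : Int) with
  | nil => simp [pvRes, hP]
  | cons p t =>
    simp only []
    have hlen : ((p :: t).map (pvF A)).length = ((p :: t).map (pvH A)).length := by simp
    rw [show ((((p :: t).map (pvF A)).length : Int))
        = (((p :: t).map (pvF A)).length : Nat) from rfl]
    rw [PySem.List.pyRange_zero_nat, List.foldl_map]
    simp only [PySem.List.pyGetD_natCast]
    rw [pv_idxloop _ _ _ _ hlen]
    rw [List.zip_map']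
    simp only [pvRes, hP, PySem.List.max?_id_cons, Option.getD_some, List.map_cons]
    rw [show ((pvF A p, pvH A p) :: t.map (fun a => (pvF A a, pvH A a)))
        = (p :: t).map (fun a => (pvF A a, pvH A a)) from rfl,
      List.filter_map, List.map_map]
    rfl

theorem pvB_char (A : List Int) : maxMult_alt A = pvRes A := by
  unfold maxMult_alt
  rw [pv_double_fold (A.length : Int)
      (fun (best : Option Int) i j =>
        let p := PySem.List.pyGetD A i 0 * PySem.List.pyGetD A j 0
        match best with
        | none => some p
        | some b => if p > b then some p else some b)]
  cases hP : pvIJ (A.length : Int) with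
  | nil => simp [pvRes, hP]
  | cons p t =>
    rw [show ((p :: t).foldl (fun (best : Option Int) q =>
          let pp := PySem.List.pyGetD A q.1 0 * PySem.List.pyGetD A q.2 0
          match best with
          | none => some pp
          | some b => if pp > b then some pp else some b) none)
        = some ((t.map (pvF A)).foldl max (pvF A p)) from by
      rw [List.foldl_cons]; exact pv_optmax (pvF A) t (pvF A p)]
    show (PySem.List.pyRange 0 (A.length : Int) 1).foldl (fun R i =>
        (PySem.List.pyRange (i + 1) (A.length : Int) 1).foldl (fun R j =>
          if PySem.List.pyGetD A i 0 * PySem.List.pyGetD A j 0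
              = (t.map (pvF A)).foldl max (pvF A p) then
            R ++ [(PySem.List.pyGetD A i 0, PySem.List.pyGetD A j 0)]
          else R) R) [] = pvRes A
    rw [pv_double_fold (A.length : Int)
      (fun (R : List (Int × Int)) i j =>
        if PySem.List.pyGetD A i 0 * PySem.List.pyGetD A j 0
            = (t.map (pvF A)).foldl max (pvF A p) then
          R ++ [(PySem.List.pyGetD A i 0, PySem.List.pyGetD A j 0)]
        else R)]
    rw [hP]
    rw [pv_filtloop
      (fun q : Int × Int => PySem.List.pyGetD A q.1 0 * PySem.List.pyGetD A q.2 0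
        = (t.map (pvF A)).foldl max (pvF A p))
      (fun q : Int × Int => (PySem.List.pyGetD A q.1 0, PySem.List.pyGetD A q.2 0))]
    simp [pvRes, hP, pvF]
    rfl

-- ===== VERDICT (by name: the statement is the Claim_ definition above) =====
theorem maxMult_spec : Claim_equal_maxMult := by
  intro A _
  show maxMult A = maxMult_alt A
  rw [pvA_char, pvB_char]
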